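-- pv_equiv track=rewrite | github.com/development-toolbox/rich-examples | 13_font_demo.py | to_math_bold
-- ===== SOURCE A (Python) =====
-- def to_math_bold(text):
--     """Konverterar A-Z och a-z till deras matematiskt feta Unicode-tecken."""
--     result = []
--     for c in text:
--         if 'A' <= c <= 'Z':
--             result.append(chr(ord(c) - ord('A') + 0x1D400))
--         elif 'a' <= c <= 'z':
--             result.append(chr(ord(c) - ord('a') + 0x1D41A))
--         else:
--             result.append(c)
--     return ''.join(result)
-- ===== SOURCE B (Python) =====
-- def to_math_bold(text):
--     """Konverterar A-Z och a-z till deras matematiskt feta Unicode-tecken."""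
--     # Staged global substitutions: one whole-string replace pass per letter.
--     # Correct because the math-bold targets are outside ASCII, so no later
--     # pass can ever rewrite a character produced by an earlier pass.
--     out = text
--     for i in range(26):
--         out = out.replace(chr(0x41 + i), chr(0x1D400 + i))
--         out = out.replace(chr(0x61 + i), chr(0x1D41A + i))
--     return out
-- ===== Notes on version B (the rewrite author's own statement) =====
-- stated objective: alternative
-- what changed: Instead of one per-character pass with a three-way branch, B iterates over the 26 alphabet positions and applies 52 whole-string replace passes (one per letter), relying on the bold targets being non-ASCII so passes cannot interfere.
import Mathlib
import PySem

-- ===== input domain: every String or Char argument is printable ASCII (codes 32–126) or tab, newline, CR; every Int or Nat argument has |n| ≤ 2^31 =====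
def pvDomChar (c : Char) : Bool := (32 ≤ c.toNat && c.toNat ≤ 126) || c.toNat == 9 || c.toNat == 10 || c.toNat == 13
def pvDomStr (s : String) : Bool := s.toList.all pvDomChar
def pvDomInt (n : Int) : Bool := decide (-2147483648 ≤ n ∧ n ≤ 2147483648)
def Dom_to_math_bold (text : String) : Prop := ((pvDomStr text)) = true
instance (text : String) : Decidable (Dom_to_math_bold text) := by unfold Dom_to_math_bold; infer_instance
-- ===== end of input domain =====

-- B replaces A's single per-character loop with a three-way branch by a loop over the 26
-- alphabet positions performing 52 whole-string replace passes (alternative decomposition).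


-- ===== PORT A =====
-- result = []; for c in text: append the branch's character; ''.join(result)
def to_math_bold (text : String) : String :=
  String.ofList (text.toList.foldl
    (fun result c =>
      if 'A' ≤ c ∧ c ≤ 'Z' then result ++ [Char.ofNat (c.toNat - 'A'.toNat + 0x1D400)]
      else if 'a' ≤ c ∧ c ≤ 'z' then result ++ [Char.ofNat (c.toNat - 'a'.toNat + 0x1D41A)]
      else result ++ [c])
    [])

-- ===== PORT B =====
-- out = text; for i in range(26): out = out.replace(chr(0x41+i), chr(0x1D400+i));
--                                 out = out.replace(chr(0x61+i), chr(0x1D41A+i)); return out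
def to_math_bold_alt (text : String) : String :=
  (PySem.List.pyRange 0 26).foldl
    (fun out i =>
      PySem.Str.replace
        (PySem.Str.replace out
          (String.ofList [Char.ofNat (0x41 + i).toNat]) (String.ofList [Char.ofNat (0x1D400 + i).toNat]))
        (String.ofList [Char.ofNat (0x61 + i).toNat]) (String.ofList [Char.ofNat (0x1D41A + i).toNat]))
    text

-- ===== PRECONDITION & SPEC =====
def Spec_to_math_bold (text : String) (out : String) : Prop := out = to_math_bold_alt text
instance (text : String) (out : String) : Decidable (Spec_to_math_bold text out) := by unfold Spec_to_math_bold; infer_instance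

-- ===== CLAIM (what is proved, stated in full; the proofs are below) =====
def Claim_equal_to_math_bold : Prop := ∀ (text : String), Dom_to_math_bold text → Spec_to_math_bold text (to_math_bold text)

-- ===== LEMMAS AND PROOFS =====

-- single-char str.replace is a pointwise map
lemma go_single (a b : Char) : ∀ (fuel : Nat) (l acc : List Char), l.length ≤ fuel →
    PySem.Chars.replace.go [a] [b] fuel l acc
      = acc.reverse ++ l.map (fun c => if c = a then b else c) := by
  intro fuel
  induction fuel with
  | zero => intro l acc h
            match l with
            | [] => simp [PySem.Chars.replace.go]
            | c :: t => simp at h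
  | succ m ih =>
    intro l acc h
    match l with
    | [] => simp [PySem.Chars.replace.go]
    | c :: t =>
      rw [PySem.Chars.replace.go]
      by_cases hc : c = a
      · have hp : [a].isPrefixOf (c :: t) = true := by simp [List.isPrefixOf, hc]
        simp only [hp, if_pos, List.length_cons, List.drop_succ_cons, List.drop_zero,
          List.reverse_cons, List.reverse_nil, List.nil_append, List.length_nil]
        rw [ih t ([b] ++ acc) (by simp at h; omega)]
        simp [hc]
      · have hp : [a].isPrefixOf (c :: t) = false := by
          simp [List.isPrefixOf]; exact fun h' => absurd h'.symm hc
        rw [if_neg (by simp [hp])]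
        rw [ih t (c :: acc) (by simp at h; omega)]
        simp [hc]

lemma replace_single (a b : Char) (l : List Char) :
    PySem.Chars.replace l [a] [b] = l.map (fun c => if c = a then b else c) := by
  rw [PySem.Chars.replace]
  simp only [List.isEmpty_cons, Bool.false_eq_true, if_false]
  simpa using go_single a b l.length l [] le_rfl

-- the substitution pairs handled by the first n loop iterations, and their pointwise effect
def pvPairs (n : Nat) : List (Char × Char) :=
  (List.range n).flatMap (fun i =>
    [(Char.ofNat (65 + i), Char.ofNat (0x1D400 + i)), (Char.ofNat (97 + i), Char.ofNat (0x1D41A + i))])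

def pvApply (n : Nat) (c : Char) : Char :=
  (pvPairs n).foldl (fun x p => if x = p.1 then p.2 else x) c

lemma toNat_ofNat_valid (m : Nat) (h : m < 0xD800 ∨ (0xDFFF < m ∧ m < 0x110000)) :
    (Char.ofNat m).toNat = m := by
  simp [Char.ofNat, Nat.isValidChar, h]

lemma char_ne_of_toNat_ne {c d : Char} (h : c.toNat ≠ d.toNat) : c ≠ d :=
  fun hEq => h (congrArg Char.toNat hEq)

lemma pvPairs_succ (n : Nat) : pvPairs (n + 1) = pvPairs n ++
    [(Char.ofNat (65 + n), Char.ofNat (0x1D400 + n)), (Char.ofNat (97 + n), Char.ofNat (0x1D41A + n))] := by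
  unfold pvPairs
  rw [List.range_succ, List.flatMap_append]
  simp

lemma pvApply_succ (n : Nat) (c : Char) :
    pvApply (n + 1) c =
      (fun x => if x = Char.ofNat (97 + n) then Char.ofNat (0x1D41A + n) else x)
      ((fun x => if x = Char.ofNat (65 + n) then Char.ofNat (0x1D400 + n) else x)
        (pvApply n c)) := by
  unfold pvApply
  rw [pvPairs_succ, List.foldl_append]
  rfl

lemma apply_none (n : Nat) (hn : n ≤ 26) (c : Char)
    (h : ∀ i, i < n → c.toNat ≠ 65 + i ∧ c.toNat ≠ 97 + i) : pvApply n c = c := by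
  induction n with
  | zero => rfl
  | succ m ih =>
    rw [pvApply_succ, ih (by omega) (fun i hi => h i (by omega))]
    have h1 : c ≠ Char.ofNat (65 + m) := char_ne_of_toNat_ne (by
      rw [toNat_ofNat_valid (65 + m) (by omega)]; exact (h m (by omega)).1)
    have h2 : c ≠ Char.ofNat (97 + m) := char_ne_of_toNat_ne (by
      rw [toNat_ofNat_valid (97 + m) (by omega)]; exact (h m (by omega)).2)
    simp [h1, h2]

lemma apply_hit_upper (n k : Nat) (hk : k < n) (hn : n ≤ 26) :
    pvApply n (Char.ofNat (65 + k)) = Char.ofNat (0x1D400 + k) := by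
  induction n with
  | zero => omega
  | succ m ih =>
    rw [pvApply_succ]
    by_cases h : k < m
    · rw [ih h (by omega)]
      have h1 : Char.ofNat (0x1D400 + k) ≠ Char.ofNat (65 + m) := char_ne_of_toNat_ne (by
        rw [toNat_ofNat_valid (0x1D400 + k) (by omega), toNat_ofNat_valid (65 + m) (by omega)]; omega)
      have h2 : Char.ofNat (0x1D400 + k) ≠ Char.ofNat (97 + m) := char_ne_of_toNat_ne (by
        rw [toNat_ofNat_valid (0x1D400 + k) (by omega), toNat_ofNat_valid (97 + m) (by omega)]; omega)
      simp [h1, h2]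
    · have hkm : k = m := by omega
      subst hkm
      rw [apply_none k (by omega) _ (fun i hi => by
        constructor <;> (rw [toNat_ofNat_valid (65 + k) (by omega)]; omega))]
      have h2 : Char.ofNat (0x1D400 + k) ≠ Char.ofNat (97 + k) := char_ne_of_toNat_ne (by
        rw [toNat_ofNat_valid (0x1D400 + k) (by omega), toNat_ofNat_valid (97 + k) (by omega)]; omega)
      simp [h2]

lemma apply_hit_lower (n k : Nat) (hk : k < n) (hn : n ≤ 26) :
    pvApply n (Char.ofNat (97 + k)) = Char.ofNat (0x1D41A + k) := by
  induction n with
  | zero => omega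
  | succ m ih =>
    rw [pvApply_succ]
    by_cases h : k < m
    · rw [ih h (by omega)]
      have h1 : Char.ofNat (0x1D41A + k) ≠ Char.ofNat (65 + m) := char_ne_of_toNat_ne (by
        rw [toNat_ofNat_valid (0x1D41A + k) (by omega), toNat_ofNat_valid (65 + m) (by omega)]; omega)
      have h2 : Char.ofNat (0x1D41A + k) ≠ Char.ofNat (97 + m) := char_ne_of_toNat_ne (by
        rw [toNat_ofNat_valid (0x1D41A + k) (by omega), toNat_ofNat_valid (97 + m) (by omega)]; omega)
      simp [h1, h2]
    · have hkm : k = m := by omega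
      subst hkm
      rw [apply_none k (by omega) _ (fun i hi => by
        constructor <;> (rw [toNat_ofNat_valid (97 + k) (by omega)]; omega))]
      have h1 : Char.ofNat (97 + k) ≠ Char.ofNat (65 + k) := char_ne_of_toNat_ne (by
        rw [toNat_ofNat_valid (97 + k) (by omega), toNat_ofNat_valid (65 + k) (by omega)]; omega)
      simp [h1]

-- B's string fold over range(n) is the pointwise map of pvApply n
lemma B_fold (n : Nat) (hn : n ≤ 26) (l : List Char) :
    (PySem.List.pyRange 0 (n : Int)).foldl
      (fun out i =>
        PySem.Str.replace
          (PySem.Str.replace out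
            (String.ofList [Char.ofNat (0x41 + i).toNat]) (String.ofList [Char.ofNat (0x1D400 + i).toNat]))
          (String.ofList [Char.ofNat (0x61 + i).toNat]) (String.ofList [Char.ofNat (0x1D41A + i).toNat]))
      (String.ofList l)
    = String.ofList (l.map (pvApply n)) := by
  induction n with
  | zero =>
    rw [Nat.cast_zero, PySem.List.pyRange_one_eq_nil le_rfl]
    simp only [show pvApply 0 = id from rfl, List.map_id, List.foldl_nil]
  | succ m ih =>
    have hcast : ((m + 1 : Nat) : Int) = (m : Int) + 1 := by push_cast; ring
    rw [hcast, PySem.List.pyRange_one_succ_right (by positivity), List.foldl_append,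
      ih (by omega)]
    simp only [List.foldl_cons, List.foldl_nil]
    rw [PySem.Str.replace, PySem.Str.replace]
    have e1 : ((0x41 : Int) + (m : Int)).toNat = 65 + m := by omega
    have e2 : ((0x1D400 : Int) + (m : Int)).toNat = 0x1D400 + m := by omega
    have e3 : ((0x61 : Int) + (m : Int)).toNat = 97 + m := by omega
    have e4 : ((0x1D41A : Int) + (m : Int)).toNat = 0x1D41A + m := by omega
    rw [e1, e2, e3, e4]
    simp only [String.toList_ofList]
    rw [replace_single, replace_single]
    congr 1
    rw [List.map_map, List.map_map]
    exact List.map_congr_left (fun c _ => (pvApply_succ m c).symm)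

lemma char_le_iff (c d : Char) : (c ≤ d) ↔ c.toNat ≤ d.toNat := by
  rw [Char.le_def, UInt32.le_iff_toNat_le]; exact Iff.rfl

-- A's per-character branch computes exactly pvApply 26
lemma char_agree (c : Char) :
    (if 'A' ≤ c ∧ c ≤ 'Z' then Char.ofNat (c.toNat - 'A'.toNat + 0x1D400)
     else if 'a' ≤ c ∧ c ≤ 'z' then Char.ofNat (c.toNat - 'a'.toNat + 0x1D41A)
     else c) = pvApply 26 c := by
  have eA : 'A'.toNat = 65 := rfl
  have eZ : 'Z'.toNat = 90 := rfl
  have ea : 'a'.toNat = 97 := rfl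
  have ez : 'z'.toNat = 122 := rfl
  simp only [char_le_iff, eA, eZ, ea, ez]
  by_cases hU : 65 ≤ c.toNat ∧ c.toNat ≤ 90
  · have hrep : c = Char.ofNat (65 + (c.toNat - 65)) := by
      rw [show 65 + (c.toNat - 65) = c.toNat from by omega, Char.ofNat_toNat]
    rw [if_pos hU]
    conv_rhs => rw [hrep]
    rw [apply_hit_upper 26 (c.toNat - 65) (by omega) le_rfl]
    congr 1
    omega
  · rw [if_neg hU]
    by_cases hL : 97 ≤ c.toNat ∧ c.toNat ≤ 122
    · have hrep : c = Char.ofNat (97 + (c.toNat - 97)) := by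
        rw [show 97 + (c.toNat - 97) = c.toNat from by omega, Char.ofNat_toNat]
      rw [if_pos hL]
      conv_rhs => rw [hrep]
      rw [apply_hit_lower 26 (c.toNat - 97) (by omega) le_rfl]
      congr 1
      omega
    · rw [if_neg hL, apply_none 26 le_rfl c (fun i hi => by omega)]

-- ===== VERDICT (by name: the statement is the Claim_ definition above) =====
theorem to_math_bold_spec : Claim_equal_to_math_bold := by
  intro text _
  unfold Spec_to_math_bold to_math_bold to_math_bold_alt
  have hf : (fun (result : List Char) (c : Char) =>
      if 'A' ≤ c ∧ c ≤ 'Z' then result ++ [Char.ofNat (c.toNat - 'A'.toNat + 0x1D400)]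
      else if 'a' ≤ c ∧ c ≤ 'z' then result ++ [Char.ofNat (c.toNat - 'a'.toNat + 0x1D41A)]
      else result ++ [c])
    = (fun (result : List Char) (c : Char) => result ++
      [if 'A' ≤ c ∧ c ≤ 'Z' then Char.ofNat (c.toNat - 'A'.toNat + 0x1D400)
       else if 'a' ≤ c ∧ c ≤ 'z' then Char.ofNat (c.toNat - 'a'.toNat + 0x1D41A)
       else c]) := by
    funext r c
    split_ifs <;> rfl
  rw [hf, PySem.List.foldl_append_singleton_eq_map]
  simp only [List.nil_append]
  have hB := B_fold 26 le_rfl text.toList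
  rw [show ((26 : Nat) : Int) = (26 : Int) from by norm_num, String.ofList_toList] at hB
  rw [hB]
  exact congrArg String.ofList (List.map_congr_left (fun c _ => char_agree c))
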